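-- pv_equiv track=rewrite | github.com/kkr010128/codebert | problem123/problem123_100.py | solve
-- ===== SOURCE A (Python) =====
-- def solve(ls):
--     n = len(ls)
--     s = 0
--     for i in range(n):
--         s ^= ls[i]
--
--     result = [0] * n
--     for i in range(n):
--         result[i] = s ^ ls[i]
--     return result
-- ===== SOURCE B (Python) =====
-- def solve(ls):
--     prefix = []
--     pre = 0
--     for x in ls:
--         prefix.append(pre)
--         pre ^= x
--     suffix = []
--     suf = 0
--     for x in reversed(ls):
--         suffix.append(suf)
--         suf ^= x
--     suffix.reverse()
--     return [p ^ s for p, s in zip(prefix, suffix)]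
-- ===== Notes on version B (the rewrite author's own statement) =====
-- stated objective: alternative
-- what changed: Replaces the total-XOR-then-cancel scheme with prefix-XOR and suffix-XOR tables combined pairwise, never forming a single total.
import Mathlib
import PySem

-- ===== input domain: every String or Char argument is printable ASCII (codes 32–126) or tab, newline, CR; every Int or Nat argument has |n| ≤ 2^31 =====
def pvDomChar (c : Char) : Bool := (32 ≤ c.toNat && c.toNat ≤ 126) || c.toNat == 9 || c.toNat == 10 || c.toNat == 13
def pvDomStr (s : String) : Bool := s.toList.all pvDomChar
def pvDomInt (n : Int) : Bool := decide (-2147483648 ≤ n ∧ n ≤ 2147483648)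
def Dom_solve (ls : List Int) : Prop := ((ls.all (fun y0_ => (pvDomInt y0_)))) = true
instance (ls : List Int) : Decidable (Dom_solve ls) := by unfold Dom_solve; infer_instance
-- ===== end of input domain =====

-- B replaces A's total-XOR-then-cancel scheme with prefix/suffix XOR tables combined pairwise (alternative decomposition, same cost).


-- ===== PORT A =====
-- A: one pass folds every element into a single total s, then result[i] = s ^ ls[i] for each i.
def solve (ls : List Int) : List Int :=
  let s : Int := ls.foldl (fun acc x => PySem.Int.bxor acc x) 0
  ls.map (fun x => PySem.Int.bxor s x)

-- ===== PORT B =====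
-- running prefix XORs: pvPrefixes a l = [a, a^l0, a^l0^l1, ...] (accumulator value BEFORE each element)
def pvPrefixes (a : Int) : List Int → List Int
  | [] => []
  | x :: xs => a :: pvPrefixes (PySem.Int.bxor a x) xs

-- B: a prefix-XOR table, a suffix-XOR table built over the reversed list, combined pairwise; no single total.
def solve_alt (ls : List Int) : List Int :=
  let prefixT := pvPrefixes 0 ls
  let suffixT := (pvPrefixes 0 ls.reverse).reverse
  List.zipWith (fun p s => PySem.Int.bxor p s) prefixT suffixT

-- ===== PRECONDITION & SPEC =====
def Spec_solve (ls : List Int) (out : List Int) : Prop := out = solve_alt ls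
instance (ls : List Int) (out : List Int) : Decidable (Spec_solve ls out) := by unfold Spec_solve; infer_instance

-- ===== CLAIM (what is proved, stated in full; the proofs are below) =====
def Claim_equal_solve : Prop := ∀ (ls : List Int), Dom_solve ls → Spec_solve ls (solve ls)

-- ===== LEMMAS AND PROOFS =====

-- two's-complement decomposition of bxor into a sign bit and a Nat magnitude
def pvMag (a : Int) : Nat := if 0 ≤ a then a.toNat else (-a - 1).toNat
def pvSgn (a : Int) : Bool := decide (0 ≤ a)

theorem pvBxor_form (a b : Int) :
    PySem.Int.bxor a b =
      cond (pvSgn a == pvSgn b) ((pvMag a ^^^ pvMag b : Nat) : Int)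
        (-((pvMag a ^^^ pvMag b : Nat) : Int) - 1) := by
  unfold PySem.Int.bxor pvMag pvSgn
  split_ifs with ha hb hb2
  · simp [ha, hb]
  · simp [ha, hb]
  · simp [ha, hb2]
  · simp [ha, hb2]

theorem pvSgn_nat (n : Nat) : pvSgn ((n : Nat) : Int) = true := by simp [pvSgn]
theorem pvMag_nat (n : Nat) : pvMag ((n : Nat) : Int) = n := by simp [pvMag]
theorem pvSgn_neg (n : Nat) : pvSgn (-((n : Nat) : Int) - 1) = false := by
  simp [pvSgn]; omega
theorem pvMag_neg (n : Nat) : pvMag (-((n : Nat) : Int) - 1) = n := by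
  simp [pvMag]; omega

theorem pvBxor_assoc (a b c : Int) :
    PySem.Int.bxor (PySem.Int.bxor a b) c = PySem.Int.bxor a (PySem.Int.bxor b c) := by
  rw [pvBxor_form a b, pvBxor_form b c]
  cases h1 : pvSgn a == pvSgn b <;> cases h2 : pvSgn b == pvSgn c <;>
    simp only [cond_true, cond_false] <;>
    rw [pvBxor_form, pvBxor_form] <;>
    simp only [pvSgn_nat, pvMag_nat, pvSgn_neg, pvMag_neg] <;>
    cases sa : pvSgn a <;> cases sb : pvSgn b <;> cases sc : pvSgn c <;>
    simp_all [Nat.xor_assoc]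

theorem pvZero_bxor (a : Int) : PySem.Int.bxor 0 a = a := by
  rw [PySem.Int.bxor_comm, PySem.Int.bxor_zero]

theorem pvFoldlXor_shift (l : List Int) (a : Int) :
    l.foldl (fun acc x => PySem.Int.bxor acc x) a =
      PySem.Int.bxor a (l.foldl (fun acc x => PySem.Int.bxor acc x) 0) := by
  induction l generalizing a with
  | nil => simp [PySem.Int.bxor_zero]
  | cons x xs ih =>
    simp only [List.foldl_cons]
    rw [ih (PySem.Int.bxor a x), ih (PySem.Int.bxor 0 x), pvZero_bxor, pvBxor_assoc]

theorem pvPrefixes_append (l₁ l₂ : List Int) (a : Int) :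
    pvPrefixes a (l₁ ++ l₂) =
      pvPrefixes a l₁ ++ pvPrefixes (l₁.foldl (fun acc x => PySem.Int.bxor acc x) a) l₂ := by
  induction l₁ generalizing a with
  | nil => simp [pvPrefixes]
  | cons x xs ih => simp [pvPrefixes, ih]

theorem pvFoldlXor_reverse (l : List Int) :
    l.reverse.foldl (fun acc x => PySem.Int.bxor acc x) 0 =
      l.foldl (fun acc x => PySem.Int.bxor acc x) 0 := by
  induction l with
  | nil => rfl
  | cons x xs ih =>
    simp only [List.reverse_cons, List.foldl_append, List.foldl_cons, List.foldl_nil]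
    rw [pvFoldlXor_shift xs, ih, pvZero_bxor]
    exact PySem.Int.bxor_comm _ _

theorem pvSuffix_cons (x : Int) (xs : List Int) :
    (pvPrefixes 0 (x :: xs).reverse).reverse =
      xs.foldl (fun acc x => PySem.Int.bxor acc x) 0 :: (pvPrefixes 0 xs.reverse).reverse := by
  simp only [List.reverse_cons, pvPrefixes_append, pvPrefixes, List.reverse_append]
  rw [pvFoldlXor_reverse]
  rfl

theorem pvMain (ls : List Int) (a : Int) :
    List.zipWith (fun p s => PySem.Int.bxor p s) (pvPrefixes a ls)
        ((pvPrefixes 0 ls.reverse).reverse) =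
      ls.map (fun x =>
        PySem.Int.bxor (ls.foldl (fun acc y => PySem.Int.bxor acc y) a) x) := by
  induction ls generalizing a with
  | nil => rfl
  | cons x xs ih =>
    rw [pvSuffix_cons]
    simp only [pvPrefixes, List.zipWith_cons_cons, List.map_cons, List.foldl_cons, ih]
    rw [pvFoldlXor_shift xs (PySem.Int.bxor a x), pvBxor_assoc,
      PySem.Int.bxor_comm x, pvBxor_assoc,
      pvBxor_assoc (xs.foldl (fun acc y => PySem.Int.bxor acc y) 0) x x,
      PySem.Int.bxor_self, PySem.Int.bxor_zero]

-- ===== VERDICT (by name: the statement is the Claim_ definition above) =====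
theorem solve_spec : Claim_equal_solve := by
  intro ls _
  unfold Spec_solve solve solve_alt
  rw [pvMain]
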